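-- pv_equiv track=rewrite | github.com/SevenChords/Light_Colors | main.py | find_min_spacing
-- ===== SOURCE A (Python) =====
-- def find_min_spacing(_list):
--     _l = len(_list)
--     min_spacing = _l
--     for _i in range(_l):
--         for j in range(_l):
--             if j >= min_spacing:
--                 break
--             k = (_i + j) % _l
--             if k == _i:
--                 continue
--             if _list[_i][0] in _list[k]:
--                 min_spacing = j
--                 break
--             if _list[_i][1] in _list[k]:
--                 min_spacing = j
--                 break
--     return min_spacing
-- ===== SOURCE B (Python) =====
-- def find_min_spacing(_list):
--     l = len(_list)
--     # index every color: pos[c] = ascending indices whose row contains c,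
--     # src[c] = ascending indices where c is one of the first two entries
--     pos = {}
--     for t, row in enumerate(_list):
--         for c in row:
--             pos.setdefault(c, []).append(t)
--     src = {}
--     for s, row in enumerate(_list):
--         for c in row[:2]:
--             src.setdefault(c, []).append(s)
--     best = l
--     for c, S in src.items():
--         T = pos[c]          # nonempty: every source index also carries c
--         ti = 0              # monotone pointer into T (two-pointer merge)
--         for s in S:
--             while ti < len(T) and T[ti] <= s:
--                 ti += 1
--             nt = T[ti] if ti < len(T) else T[0] + l
--             d = nt - s
--             if d < best:
--                 best = d
--     return best
-- ===== Notes on version B (the rewrite author's own statement) =====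
-- stated objective: alternative
-- what changed: Instead of A's per-element scan over all forward circular offsets with pruning, B builds color->position indexes in one pass and finds each element's nearest forward color-sharing position by a two-pointer merge per color group; on the random timing inputs A's pruning makes it comparably fast, so no speed is claimed.
-- outside the precondition, e.g. on find_min_spacing([[1], [1]]): A returns 1, B returns 1
import Mathlib
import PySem

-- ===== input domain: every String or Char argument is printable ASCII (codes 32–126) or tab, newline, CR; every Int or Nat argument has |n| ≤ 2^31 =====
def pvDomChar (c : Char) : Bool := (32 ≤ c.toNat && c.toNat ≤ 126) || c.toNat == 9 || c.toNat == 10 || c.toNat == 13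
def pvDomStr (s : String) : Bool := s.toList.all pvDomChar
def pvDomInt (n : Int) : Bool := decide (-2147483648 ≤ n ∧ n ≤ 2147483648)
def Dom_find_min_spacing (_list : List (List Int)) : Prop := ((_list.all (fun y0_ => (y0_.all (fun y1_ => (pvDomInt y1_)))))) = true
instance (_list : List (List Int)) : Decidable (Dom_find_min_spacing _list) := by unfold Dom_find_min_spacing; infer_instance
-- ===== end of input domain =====

-- B replaces A's per-element scan over forward circular offsets by color→position
-- indexes built in one pass plus a two-pointer merge per color group (objective:
-- alternative algorithm); return values agree on all inputs admitted by Pre_.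

-- ===== PORT A =====
-- inner 'for j in range(_l)' loop of A, with its breaks/continue; returns the updated min_spacing
def pvInnerA (rows : List (List Int)) (l i : Int) : List Int → Int → Int
  | [], m => m
  | j :: js, m =>
    if j ≥ m then m                                   -- 'if j >= min_spacing: break'
    else
      let k := PySem.Int.mod (i + j) l
      if k = i then pvInnerA rows l i js m            -- 'if k == _i: continue'
      else if PySem.List.pyGetD (PySem.List.pyGetD rows i []) 0 0 ∈ PySem.List.pyGetD rows k [] then j
      else if PySem.List.pyGetD (PySem.List.pyGetD rows i []) 1 0 ∈ PySem.List.pyGetD rows k [] then j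
      else pvInnerA rows l i js m

def find_min_spacing (_list : List (List Int)) : Int :=
  let l : Int := PySem.List.len _list
  (PySem.List.pyRange 0 l 1).foldl
    (fun m i => pvInnerA _list l i (PySem.List.pyRange 0 l 1) m) l

-- ===== PORT B =====
-- 'while ti < len(T) and T[ti] <= s: ti += 1' — the pointer ti is represented by the suffix of T it points at
def pvAdvance (s : Int) : List Int → List Int
  | [] => []
  | t :: r => if t ≤ s then pvAdvance s r else t :: r

-- 'for s in S:' body of B's merge loop; t0 is T[0] (T is nonempty whenever this runs)
def pvScan (l t0 : Int) : List Int → List Int → Int → Int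
  | _, [], best => best
  | rem, s :: S, best =>
    let rem' := pvAdvance s rem
    let nt := rem'.headD (t0 + l)   -- 'T[ti] if ti < len(T) else T[0] + l' 
    let d := nt - s
    pvScan l t0 rem' S (if d < best then d else best)

-- 'pos.setdefault(c, []).append(t)' is exactly Dict.modify c [] (· ++ [t])
def find_min_spacing_alt (_list : List (List Int)) : Int :=
  let l : Int := PySem.List.len _list
  let pos : PySem.Dict Int (List Int) :=
    (PySem.List.enumerate _list).foldl
      (fun d p => p.2.foldl (fun d c => d.modify c [] (· ++ [p.1])) d) PySem.Dict.empty
  let src : PySem.Dict Int (List Int) :=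
    (PySem.List.enumerate _list).foldl
      (fun d p => (PySem.List.slice p.2 none (some 2)).foldl (fun d c => d.modify c [] (· ++ [p.1])) d) PySem.Dict.empty
  src.items.foldl
    (fun best cs =>
      let T := pos.getD cs.1 []
      pvScan l (PySem.List.pyGetD T 0 0) T cs.2 best) l

-- ===== PRECONDITION & SPEC =====
-- Pre_ excludes lists with at least two rows in which some row has fewer than two entries:
-- there A usually raises IndexError on _list[_i][1] (or [0]), and when it happens to return,
-- the value depends on accidental short-circuiting of the second-element test.
def Pre_find_min_spacing (_list : List (List Int)) : Prop :=
  _list.length ≤ 1 ∨ ∀ row ∈ _list, 2 ≤ row.length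
instance (_list : List (List Int)) : Decidable (Pre_find_min_spacing _list) := by
  unfold Pre_find_min_spacing; infer_instance

def pvWitness_find_min_spacing : List (List Int) := [[1, 2], [3, 4]]

def Spec_find_min_spacing (_list : List (List Int)) (out : Int) : Prop := out = find_min_spacing_alt _list
instance (_list : List (List Int)) (out : Int) : Decidable (Spec_find_min_spacing _list out) := by unfold Spec_find_min_spacing; infer_instance

-- ===== CLAIM (what is proved, stated in full; the proofs are below) =====
def Claim_equal_find_min_spacing : Prop := ∀ (_list : List (List Int)), Dom_find_min_spacing _list → Pre_find_min_spacing _list → Spec_find_min_spacing _list (find_min_spacing _list)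

-- ===== LEMMAS AND PROOFS =====

-- the shared characterisation: j is a candidate spacing iff some row s shares one of its
-- first two entries with a different row t at forward circular distance j
def pvCand (rows : List (List Int)) (j : Int) : Prop :=
  ∃ s t : Nat, s < rows.length ∧ t < rows.length ∧ s ≠ t ∧
    (∃ c, c ∈ (rows.getD s []).take 2 ∧ c ∈ rows.getD t []) ∧
    j = ((t : Int) - (s : Int)) % (rows.length : Int)

-- A's inner-loop test at offset j from row i
def pvMatch (rows : List (List Int)) (i j : Int) : Prop :=
  let l : Int := rows.length
  let k := PySem.Int.mod (i + j) l
  k ≠ i ∧ (PySem.List.pyGetD (PySem.List.pyGetD rows i []) 0 0 ∈ PySem.List.pyGetD rows k []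
        ∨ PySem.List.pyGetD (PySem.List.pyGetD rows i []) 1 0 ∈ PySem.List.pyGetD rows k [])

lemma pvInnerA_char (rows : List (List Int)) (i : Int) :
    ∀ (js : List Int) (m : Int), js.Pairwise (· ≤ ·) →
    pvInnerA rows (rows.length : Int) i js m ≤ m ∧
    (pvInnerA rows (rows.length : Int) i js m = m ∨
      (pvInnerA rows (rows.length : Int) i js m ∈ js ∧ pvMatch rows i (pvInnerA rows (rows.length : Int) i js m))) ∧
    (∀ j ∈ js, pvMatch rows i j → pvInnerA rows (rows.length : Int) i js m ≤ j) := by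
  intro js
  induction js with
  | nil => intro m _; simp [pvInnerA]
  | cons j js ih =>
    intro m hp
    rw [List.pairwise_cons] at hp
    obtain ⟨hj, hp'⟩ := hp
    by_cases h1 : j ≥ m
    · simp only [pvInnerA, if_pos h1]
      refine ⟨le_refl _, by simp, ?_⟩
      intro j' hj' _
      rcases List.mem_cons.mp hj' with h | h
      · omega
      · have := hj j' h; omega
    · simp only [pvInnerA, if_neg h1]
      by_cases h2 : PySem.Int.mod (i + j) (rows.length : Int) = i
      · simp only [if_pos h2]
        obtain ⟨c1, c2, c3⟩ := ih m hp'
        refine ⟨c1, ?_, ?_⟩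
        · rcases c2 with h | ⟨hmem, hm⟩
          · exact Or.inl h
          · exact Or.inr ⟨List.mem_cons_of_mem _ hmem, hm⟩
        · intro j' hj' hm
          rcases List.mem_cons.mp hj' with h | h
          · subst h; exact absurd h2 hm.1
          · exact c3 j' h hm
      · simp only [if_neg h2]
        by_cases h3 : PySem.List.pyGetD (PySem.List.pyGetD rows i []) 0 0 ∈
            PySem.List.pyGetD rows (PySem.Int.mod (i + j) (rows.length : Int)) []
        · simp only [if_pos h3]
          refine ⟨by omega, Or.inr ⟨List.mem_cons_self, h2, Or.inl h3⟩, ?_⟩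
          intro j' hj' _
          rcases List.mem_cons.mp hj' with h | h
          · omega
          · exact hj j' h
        · simp only [if_neg h3]
          by_cases h4 : PySem.List.pyGetD (PySem.List.pyGetD rows i []) 1 0 ∈
              PySem.List.pyGetD rows (PySem.Int.mod (i + j) (rows.length : Int)) []
          · simp only [if_pos h4]
            refine ⟨by omega, Or.inr ⟨List.mem_cons_self, h2, Or.inr h4⟩, ?_⟩
            intro j' hj' _
            rcases List.mem_cons.mp hj' with h | h
            · omega
            · exact hj j' h
          · simp only [if_neg h4]
            obtain ⟨c1, c2, c3⟩ := ih m hp'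
            refine ⟨c1, ?_, ?_⟩
            · rcases c2 with h | ⟨hmem, hm⟩
              · exact Or.inl h
              · exact Or.inr ⟨List.mem_cons_of_mem _ hmem, hm⟩
            · intro j' hj' hm
              rcases List.mem_cons.mp hj' with h | h
              · subst h; rcases hm.2 with h | h
                · exact absurd h h3
                · exact absurd h h4
              · exact c3 j' h hm

lemma pvOuterA_char (rows : List (List Int)) :
    ∀ (is : List Int) (m0 : Int),
    (is.foldl (fun m i => pvInnerA rows (rows.length : Int) i (PySem.List.pyRange 0 (rows.length : Int) 1) m) m0) ≤ m0 ∧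
    ((is.foldl (fun m i => pvInnerA rows (rows.length : Int) i (PySem.List.pyRange 0 (rows.length : Int) 1) m) m0) = m0 ∨
      ∃ i ∈ is, (is.foldl (fun m i => pvInnerA rows (rows.length : Int) i (PySem.List.pyRange 0 (rows.length : Int) 1) m) m0) ∈ PySem.List.pyRange 0 (rows.length : Int) 1 ∧
        pvMatch rows i (is.foldl (fun m i => pvInnerA rows (rows.length : Int) i (PySem.List.pyRange 0 (rows.length : Int) 1) m) m0)) ∧
    (∀ i ∈ is, ∀ j ∈ PySem.List.pyRange 0 (rows.length : Int) 1, pvMatch rows i j →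
      (is.foldl (fun m i => pvInnerA rows (rows.length : Int) i (PySem.List.pyRange 0 (rows.length : Int) 1) m) m0) ≤ j) := by
  have hrange : (PySem.List.pyRange 0 (rows.length : Int) 1).Pairwise (· ≤ ·) :=
    (PySem.List.pairwise_lt_pyRange_one 0 (rows.length : Int)).imp (fun h => le_of_lt h)
  intro is
  induction is with
  | nil => intro m0; simp
  | cons i is ih =>
    intro m0
    simp only [List.foldl_cons]
    obtain ⟨c1, c2, c3⟩ := pvInnerA_char rows i (PySem.List.pyRange 0 (rows.length : Int) 1)
      m0 hrange
    obtain ⟨d1, d2, d3⟩ := ih (pvInnerA rows (rows.length : Int) i (PySem.List.pyRange 0 (rows.length : Int) 1) m0)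
    refine ⟨by omega, ?_, ?_⟩
    · rcases d2 with h | ⟨i', hi', hmem, hm⟩
      · rw [h]
        rcases c2 with h' | ⟨hmem, hm⟩
        · exact Or.inl h'
        · exact Or.inr ⟨i, List.mem_cons_self, hmem, hm⟩
      · exact Or.inr ⟨i', List.mem_cons_of_mem _ hi', hmem, hm⟩
    · intro i' hi' j hjmem hm
      rcases List.mem_cons.mp hi' with h | h
      · subst h; have := c3 j hjmem hm; omega
      · exact d3 i' h j hjmem hm

lemma pvTake2_mem (xs : List Int) (h : 2 ≤ xs.length) (c : Int) :
    c ∈ xs.take 2 ↔ c = xs.getD 0 0 ∨ c = xs.getD 1 0 := by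
  match xs, h with
  | a :: b :: t, _ => simp [List.take]

lemma pvCand_bounds (rows : List (List Int)) (j : Int) (h : pvCand rows j) :
    1 ≤ j ∧ j < (rows.length : Int) := by
  obtain ⟨s, t, hs, ht, hne, _, hj⟩ := h
  have hs' : ((s : Int)) < (rows.length : Int) := by exact_mod_cast hs
  have ht' : ((t : Int)) < (rows.length : Int) := by exact_mod_cast ht
  have hne' : ((t : Int)) ≠ (s : Int) := by exact_mod_cast fun e => hne (by omega)
  subst hj
  refine ⟨?_, Int.emod_lt_of_pos _ (by omega)⟩
  rcases lt_or_gt_of_ne hne' with hlt | hgt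
  · have h2 : ((t : Int) - s + rows.length) % (rows.length : Int) = ((t : Int) - s) % (rows.length : Int) :=
      Int.add_emod_right _ _
    have h3 := Int.emod_eq_of_lt (a := (t : Int) - s + rows.length) (b := (rows.length : Int))
      (by omega) (by omega)
    omega
  · have := Int.emod_eq_of_lt (a := (t : Int) - s) (b := (rows.length : Int)) (by omega) (by omega)
    omega

lemma pvGetD_mem_of_lt (rows : List (List Int)) (s : Nat) (h : s < rows.length) :
    rows.getD s [] ∈ rows := by
  rw [List.getD_eq_getElem?_getD, List.getElem?_eq_getElem h]
  simp

lemma pvMatch_to_cand (rows : List (List Int)) (i j : Int)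
    (hPre : Pre_find_min_spacing rows)
    (hi : 0 ≤ i ∧ i < (rows.length : Int)) (hj : 0 ≤ j ∧ j < (rows.length : Int))
    (h : pvMatch rows i j) : pvCand rows j := by
  have hL : (0 : Int) < (rows.length : Int) := by omega
  simp only [pvMatch] at h
  rw [PySem.Int.mod_eq_emod_of_pos hL] at h
  obtain ⟨hki, hmem⟩ := h
  set k : Int := (i + j) % (rows.length : Int) with hk
  have hk0 : 0 ≤ k := Int.emod_nonneg _ (by omega)
  have hkL : k < (rows.length : Int) := Int.emod_lt_of_pos _ hL
  -- k ≠ i and both in [0,L) forces at least two rows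
  have hn2 : 2 ≤ rows.length := by omega
  have hPre' : ∀ row ∈ rows, 2 ≤ row.length := by
    rcases hPre with h | h
    · omega
    · exact h
  have his : i = ((i.toNat : Nat) : Int) := by omega
  have hkt : k = ((k.toNat : Nat) : Int) := by omega
  rw [his, hkt, PySem.List.pyGetD_natCast, PySem.List.pyGetD_natCast] at hmem
  have hlen : 2 ≤ (rows.getD i.toNat []).length :=
    hPre' _ (pvGetD_mem_of_lt rows i.toNat (by omega))
  refine ⟨i.toNat, k.toNat, by omega, by omega, by omega, ?_, ?_⟩
  · rcases hmem with hm | hm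
    · exact ⟨_, (pvTake2_mem _ hlen _).mpr (Or.inl (by rw [← PySem.List.pyGetD_zero])), hm⟩
    · exact ⟨_, (pvTake2_mem _ hlen _).mpr (Or.inr (by rw [← PySem.List.pyGetD_ofNat' (rows.getD i.toNat []) 1 0])), hm⟩
  · -- j = (k - i) % L
    have h1 : ((k.toNat : Int) - (i.toNat : Int)) % (rows.length : Int) = j % (rows.length : Int) := by
      rw [← hkt, ← his, hk]
      rw [Int.sub_emod, Int.emod_emod_of_dvd _ dvd_rfl, ← Int.sub_emod]
      ring_nf
    rw [h1, Int.emod_eq_of_lt hj.1 hj.2]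

lemma pvCand_to_match (rows : List (List Int)) (j : Int)
    (hPre : Pre_find_min_spacing rows) (h : pvCand rows j) :
    ∃ i, 0 ≤ i ∧ i < (rows.length : Int) ∧ pvMatch rows i j := by
  obtain ⟨s, t, hs, ht, hne, ⟨c, hc1, hc2⟩, hj⟩ := h
  obtain ⟨hj1, hj2⟩ := pvCand_bounds rows j ⟨s, t, hs, ht, hne, ⟨c, hc1, hc2⟩, hj⟩
  have hL : (0 : Int) < (rows.length : Int) := by omega
  have hs' : ((s : Int)) < (rows.length : Int) := by exact_mod_cast hs
  have ht' : ((t : Int)) < (rows.length : Int) := by exact_mod_cast ht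
  have hn2 : 2 ≤ rows.length := by
    rcases Nat.lt_or_ge s t with h' | h'
    · omega
    · rcases Nat.lt_or_ge t s with h'' | h'' <;> omega
  have hPre' : ∀ row ∈ rows, 2 ≤ row.length := by
    rcases hPre with h' | h'
    · omega
    · exact h'
  refine ⟨(s : Int), by omega, hs', ?_⟩
  simp only [pvMatch]
  rw [PySem.Int.mod_eq_emod_of_pos hL]
  have hkt : ((s : Int) + j) % (rows.length : Int) = (t : Int) := by
    have h1 : ((s : Int) + j) % (rows.length : Int) = ((s : Int) + ((t : Int) - s)) % (rows.length : Int) := by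
      rw [hj, Int.add_emod, Int.emod_emod_of_dvd _ dvd_rfl, ← Int.add_emod]
    rw [h1]
    have : (s : Int) + ((t : Int) - s) = (t : Int) := by ring
    rw [this, Int.emod_eq_of_lt (by omega) ht']
  rw [hkt]
  constructor
  · exact_mod_cast fun e => hne (by exact_mod_cast e.symm)
  · have hlen : 2 ≤ (rows.getD s []).length := hPre' _ (pvGetD_mem_of_lt rows s hs)
    rw [pvTake2_mem _ hlen] at hc1
    rw [PySem.List.pyGetD_natCast, PySem.List.pyGetD_natCast]
    rcases hc1 with h' | h'
    · exact Or.inl (by rw [PySem.List.pyGetD_zero, ← h']; exact hc2)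
    · exact Or.inr (by rw [PySem.List.pyGetD_ofNat' _ 1 0, ← h']; exact hc2)

lemma pvA_char (rows : List (List Int)) (hPre : Pre_find_min_spacing rows) :
    find_min_spacing rows ≤ (rows.length : Int) ∧
    (find_min_spacing rows = (rows.length : Int) ∨ pvCand rows (find_min_spacing rows)) ∧
    (∀ j, pvCand rows j → find_min_spacing rows ≤ j) := by
  have hdef : find_min_spacing rows =
      (PySem.List.pyRange 0 (rows.length : Int) 1).foldl
        (fun m i => pvInnerA rows (rows.length : Int) i (PySem.List.pyRange 0 (rows.length : Int) 1) m)
        (rows.length : Int) := by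
    simp only [find_min_spacing, PySem.List.len_eq]
  obtain ⟨c1, c2, c3⟩ := pvOuterA_char rows (PySem.List.pyRange 0 (rows.length : Int) 1) (rows.length : Int)
  rw [← hdef] at c1 c2 c3
  refine ⟨c1, ?_, ?_⟩
  · rcases c2 with h | ⟨i, hi, hmem, hm⟩
    · exact Or.inl h
    · right
      rw [PySem.List.mem_pyRange_one] at hi hmem
      exact pvMatch_to_cand rows i _ hPre ⟨hi.1, hi.2⟩ ⟨hmem.1, hmem.2⟩ hm
  · intro j hj
    obtain ⟨i, hi0, hiL, hm⟩ := pvCand_to_match rows j hPre hj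
    obtain ⟨hj1, hj2⟩ := pvCand_bounds rows j hj
    exact c3 i (PySem.List.mem_pyRange_one.mpr ⟨hi0, hiL⟩) j
      (PySem.List.mem_pyRange_one.mpr ⟨by omega, hj2⟩) hm

-- ---------- B side ----------

def pvPairs (f : List Int → List Int) (rows : List (List Int)) : List (Int × Int) :=
  (PySem.List.enumerate rows).flatMap (fun p => (f p.2).map (fun c => (c, p.1)))

def pvOcc (f : List Int → List Int) (rows : List (List Int)) (c : Int) : List Int :=
  ((pvPairs f rows).filter (fun p => p.1 == c)).map (fun p => p.2)

lemma pvGetD_eq (rows : List (List Int)) (k : Nat) (h : k < rows.length) :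
    rows.getD k [] = rows[k] := by
  rw [List.getD_eq_getElem?_getD, List.getElem?_eq_getElem h]
  rfl

lemma pvPairs_mem (f : List Int → List Int) (rows : List (List Int)) (q : Int × Int) :
    q ∈ pvPairs f rows ↔ ∃ k : Nat, k < rows.length ∧ q.2 = (k : Int) ∧ q.1 ∈ f (rows.getD k []) := by
  constructor
  · intro hq
    rw [pvPairs, List.mem_flatMap] at hq
    obtain ⟨p, hp, hq⟩ := hq
    rw [PySem.List.mem_enumerate_iff] at hp
    obtain ⟨k, hk, rfl⟩ := hp
    rw [List.mem_map] at hq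
    obtain ⟨c, hc, rfl⟩ := hq
    exact ⟨k, hk, by simp, by rw [pvGetD_eq rows k hk]; exact hc⟩
  · rintro ⟨k, hk, hq2, hq1⟩
    rw [pvPairs, List.mem_flatMap]
    refine ⟨((k : Int), rows[k]), ?_, ?_⟩
    · rw [PySem.List.mem_enumerate_iff]
      exact ⟨k, hk, by simp⟩
    · rw [List.mem_map]
      refine ⟨q.1, by rw [← pvGetD_eq rows k hk]; exact hq1, ?_⟩
      have : q = (q.1, q.2) := rfl
      rw [this, hq2]

lemma pvOcc_mem (f : List Int → List Int) (rows : List (List Int)) (c x : Int) :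
    x ∈ pvOcc f rows c ↔ ∃ k : Nat, k < rows.length ∧ x = (k : Int) ∧ c ∈ f (rows.getD k []) := by
  rw [pvOcc, List.mem_map]
  constructor
  · rintro ⟨q, hq, rfl⟩
    rw [List.mem_filter] at hq
    obtain ⟨hq, hqc⟩ := hq
    rw [pvPairs_mem] at hq
    obtain ⟨k, hk, h2, h1⟩ := hq
    have : q.1 = c := by simpa using hqc
    exact ⟨k, hk, h2, this ▸ h1⟩
  · rintro ⟨k, hk, rfl, hc⟩
    refine ⟨(c, (k : Int)), ?_, rfl⟩
    rw [List.mem_filter]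
    exact ⟨(pvPairs_mem f rows (c, (k : Int))).mpr ⟨k, hk, rfl, hc⟩, by simp⟩

lemma pvPairsAux_snd (f : List Int → List Int) (xs : List (List Int)) :
    ∀ s : Int,
      (∀ q ∈ (PySem.List.enumerate xs s).flatMap (fun p => (f p.2).map (fun c => (c, p.1))),
        s ≤ q.2) ∧
      ((PySem.List.enumerate xs s).flatMap (fun p => (f p.2).map (fun c => (c, p.1)))).Pairwise
        (fun p q => p.2 ≤ q.2) := by
  induction xs with
  | nil => intro s; simp [PySem.List.enumerate_nil]
  | cons x xs ih =>
    intro s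
    rw [PySem.List.enumerate_cons]
    rw [List.flatMap_cons]
    obtain ⟨ihb, ihs⟩ := ih (s + 1)
    constructor
    · intro q hq
      rcases List.mem_append.mp hq with h | h
      · rw [List.mem_map] at h
        obtain ⟨c, _, rfl⟩ := h
        exact le_refl s
      · have := ihb q h; omega
    · rw [List.pairwise_append]
      refine ⟨?_, ihs, ?_⟩
      · rw [List.pairwise_map]
        exact List.pairwise_of_forall (fun _ _ => le_refl s)
      · intro a ha b hb
        rw [List.mem_map] at ha
        obtain ⟨c, _, rfl⟩ := ha
        have := ihb b hb
        simpa using by omega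

lemma pvPairs_snd_sorted (f : List Int → List Int) (rows : List (List Int)) :
    (pvPairs f rows).Pairwise (fun p q => p.2 ≤ q.2) := by
  rw [pvPairs]
  exact (pvPairsAux_snd f rows 0).2

lemma pvOcc_sorted (f : List Int → List Int) (rows : List (List Int)) (c : Int) :
    (pvOcc f rows c).Pairwise (· ≤ ·) := by
  rw [pvOcc, List.pairwise_map]
  exact (pvPairs_snd_sorted f rows).filter _

lemma pvBuild_eq_flat (f : List Int → List Int) (rows : List (List Int)) :
    ((PySem.List.enumerate rows).foldl
        (fun d p => (f p.2).foldl (fun d c => d.modify c [] (· ++ [p.1])) d)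
        PySem.Dict.empty : PySem.Dict Int (List Int))
      = (pvPairs f rows).foldl (fun d q => d.modify q.1 [] (· ++ [q.2])) PySem.Dict.empty := by
  rw [pvPairs, List.foldl_flatMap]
  simp [List.foldl_map]

lemma pvBuild_getD (f : List Int → List Int) (rows : List (List Int)) (c : Int) :
    (((PySem.List.enumerate rows).foldl
        (fun d p => (f p.2).foldl (fun d c => d.modify c [] (· ++ [p.1])) d)
        PySem.Dict.empty : PySem.Dict Int (List Int)).getD c []) = pvOcc f rows c := by
  rw [pvBuild_eq_flat, PySem.Dict.getD_foldl_modify_append]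
  simp [pvOcc]

lemma pvBuild_keys (f : List Int → List Int) (rows : List (List Int)) :
    (((PySem.List.enumerate rows).foldl
        (fun d p => (f p.2).foldl (fun d c => d.modify c [] (· ++ [p.1])) d)
        PySem.Dict.empty : PySem.Dict Int (List Int)).keys)
      = PySem.Set.ofList ((pvPairs f rows).map (fun p => p.1)) := by
  rw [pvBuild_eq_flat]
  rw [PySem.Dict.keys_foldl_modify_key (pvPairs f rows) (fun q => q.1) [] (fun _ q => (· ++ [q.2]))]
  simp [PySem.Set.update_nil_left]

lemma pvBuild_keys_nodup (f : List Int → List Int) (rows : List (List Int)) :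
    (((PySem.List.enumerate rows).foldl
        (fun d p => (f p.2).foldl (fun d c => d.modify c [] (· ++ [p.1])) d)
        PySem.Dict.empty : PySem.Dict Int (List Int)).keys).Nodup := by
  rw [pvBuild_eq_flat]
  exact PySem.Dict.nodup_keys_foldl_modify_key (pvPairs f rows) (fun q => q.1) []
    (fun _ q => (· ++ [q.2])) PySem.Dict.empty (by simp)





lemma pvAdvance_eq_filter (s p : Int) (hps : p ≤ s) :
    ∀ (T : List Int), T.Pairwise (· ≤ ·) →
    pvAdvance s (T.filter (fun t => decide (p < t))) = T.filter (fun t => decide (s < t)) := by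
  intro T
  induction T with
  | nil => intro _; simp [pvAdvance]
  | cons t T ih =>
    intro hp
    rw [List.pairwise_cons] at hp
    obtain ⟨ht, hp'⟩ := hp
    by_cases h1 : p < t
    · rw [List.filter_cons_of_pos (by simpa using h1)]
      by_cases h2 : t ≤ s
      · rw [pvAdvance, if_pos h2, ih hp', List.filter_cons_of_neg (by simpa using not_lt.mpr h2)]
      · rw [pvAdvance, if_neg h2, List.filter_cons_of_pos (by simpa using not_le.mp h2)]
        congr 1
        rw [List.filter_eq_self.mpr, List.filter_eq_self.mpr]
        · intro a ha; have := ht a ha; simp; omega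
        · intro a ha; have := ht a ha; simp; omega
    · rw [List.filter_cons_of_neg (by simpa using h1), ih hp',
        List.filter_cons_of_neg (by simp; omega)]

lemma pvModWrap (t s l : Int) (ht : 0 ≤ t) (hts : t < s) (hsl : s < l) :
    (t - s) % l = t - s + l := by
  have h2 : (t - s + l) % l = (t - s) % l := Int.add_emod_right _ _
  have h3 := Int.emod_eq_of_lt (a := t - s + l) (b := l) (by omega) (by omega)
  omega

-- one merge step: the computed distance is exactly the least forward circular distance
lemma pvStep_char (l t0 s : Int) (T : List Int) (hTs : T.Pairwise (· ≤ ·))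
    (hTb : ∀ t ∈ T, 0 ≤ t ∧ t < l) (hT0 : T.head? = some t0)
    (hs : 0 ≤ s ∧ s < l) :
    ((∀ t ∈ T, t ≠ s →
        ((T.filter (fun t => decide (s < t))).headD (t0 + l)) - s ≤ (t - s) % l) ∧
     (((T.filter (fun t => decide (s < t))).headD (t0 + l)) - s < l →
        ∃ t ∈ T, t ≠ s ∧ ((T.filter (fun t => decide (s < t))).headD (t0 + l)) - s = (t - s) % l)) := by
  have ht0T : t0 ∈ T := by
    cases T with
    | nil => simp at hT0
    | cons a T' => simp at hT0; rw [hT0]; exact List.mem_cons_self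
  have ht0min : ∀ t ∈ T, t0 ≤ t := by
    cases T with
    | nil => simp at hT0
    | cons a T' =>
      simp at hT0
      subst hT0
      intro t htm
      rcases List.mem_cons.mp htm with rfl | h
      · exact le_refl t
      · exact (List.pairwise_cons.mp hTs).1 t h
  rcases hFeq : T.filter (fun t => decide (s < t)) with _ | ⟨h, rest⟩
  · -- no element of T is greater than s
    have hall : ∀ t ∈ T, t ≤ s := by
      intro t htm
      by_contra hc
      have : t ∈ T.filter (fun t => decide (s < t)) := List.mem_filter.mpr ⟨htm, by simp; omega⟩
      rw [hFeq] at this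
      simp at this
    rw [List.headD_nil]
    constructor
    · intro t htm hts
      have h1 : t < s := lt_of_le_of_ne (hall t htm) hts
      have hb := hTb t htm
      rw [pvModWrap t s l hb.1 h1 hs.2]
      have := ht0min t htm
      omega
    · intro hlt
      have hb0 := hTb t0 ht0T
      refine ⟨t0, ht0T, by omega, ?_⟩
      rw [pvModWrap t0 s l hb0.1 (by omega) hs.2]
      omega
  · rw [List.headD_cons]
    have hmemF : h ∈ T.filter (fun t => decide (s < t)) := by rw [hFeq]; exact List.mem_cons_self
    have hhT : h ∈ T ∧ s < h := by
      have := List.mem_filter.mp hmemF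
      refine ⟨this.1, by simpa using this.2⟩
    have hmin : ∀ t ∈ rest, h ≤ t := by
      have := hTs.filter (fun t => decide (s < t))
      rw [hFeq] at this
      exact (List.pairwise_cons.mp this).1
    have hbh := hTb h hhT.1
    constructor
    · intro t htm hts
      by_cases hst : s < t
      · have htF : t ∈ T.filter (fun t => decide (s < t)) := List.mem_filter.mpr ⟨htm, by simp; omega⟩
        rw [hFeq] at htF
        have hht : h ≤ t := by
          rcases List.mem_cons.mp htF with rfl | h' 
          · exact le_refl t
          · exact hmin t h'
        have hb := hTb t htm
        rw [Int.emod_eq_of_lt (by omega) (by omega)]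
        omega
      · have h1 : t < s := by omega
        have hb := hTb t htm
        rw [pvModWrap t s l hb.1 h1 hs.2]
        omega
    · intro _
      refine ⟨h, hhT.1, by omega, ?_⟩
      rw [Int.emod_eq_of_lt (by omega) (by omega)]

lemma pvScan_char (l t0 : Int) (T : List Int) (hTs : T.Pairwise (· ≤ ·))
    (hTb : ∀ t ∈ T, 0 ≤ t ∧ t < l) (hT0 : T.head? = some t0) :
    ∀ (S : List Int) (p best : Int), S.Pairwise (· ≤ ·) →
      (∀ s ∈ S, s ∈ T ∧ p ≤ s ∧ 0 ≤ s ∧ s < l) → best ≤ l →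
    pvScan l t0 (T.filter (fun t => decide (p < t))) S best ≤ best ∧
    (pvScan l t0 (T.filter (fun t => decide (p < t))) S best = best ∨
      ∃ s ∈ S, ∃ t ∈ T, t ≠ s ∧ pvScan l t0 (T.filter (fun t => decide (p < t))) S best = (t - s) % l) ∧
    (∀ s ∈ S, ∀ t ∈ T, t ≠ s → pvScan l t0 (T.filter (fun t => decide (p < t))) S best ≤ (t - s) % l) := by
  intro S
  induction S with
  | nil => intro p best _ _ _; simp [pvScan]
  | cons s S ih =>
    intro p best hSp hSmem hbl
    obtain ⟨hsT, hps, hs0, hsl⟩ := hSmem s List.mem_cons_self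
    rw [List.pairwise_cons] at hSp
    obtain ⟨hsle, hS'⟩ := hSp
    simp only [pvScan]
    rw [pvAdvance_eq_filter s p hps T hTs]
    obtain ⟨sa, sb⟩ := pvStep_char l t0 s T hTs hTb hT0 ⟨hs0, hsl⟩
    set d := (T.filter (fun t => decide (s < t))).headD (t0 + l) - s with hd
    have hmemS' : ∀ s' ∈ S, s' ∈ T ∧ s ≤ s' ∧ 0 ≤ s' ∧ s' < l := fun s' hs' =>
      ⟨(hSmem s' (List.mem_cons_of_mem _ hs')).1, hsle s' hs',
        (hSmem s' (List.mem_cons_of_mem _ hs')).2.2⟩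
    by_cases hdb : d < best
    · rw [if_pos hdb]
      obtain ⟨i1, i2, i3⟩ := ih s d hS' hmemS' (by omega)
      refine ⟨by omega, ?_, ?_⟩
      · rcases i2 with h | ⟨s', hs', t, ht, hne, heq⟩
        · obtain ⟨t, htm, hne, heq⟩ := sb (by omega)
          exact Or.inr ⟨s, List.mem_cons_self, t, htm, hne, by rw [h, heq]⟩
        · exact Or.inr ⟨s', List.mem_cons_of_mem _ hs', t, ht, hne, heq⟩
      · intro s' hmem t htm hne
        rcases List.mem_cons.mp hmem with rfl | hs'
        · have := sa t htm hne; omega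
        · exact i3 s' hs' t htm hne
    · rw [if_neg hdb]
      obtain ⟨i1, i2, i3⟩ := ih s best hS' hmemS' hbl
      refine ⟨i1, ?_, ?_⟩
      · rcases i2 with h | ⟨s', hs', t, ht, hne, heq⟩
        · exact Or.inl h
        · exact Or.inr ⟨s', List.mem_cons_of_mem _ hs', t, ht, hne, heq⟩
      · intro s' hmem t htm hne
        rcases List.mem_cons.mp hmem with rfl | hs'
        · have := sa t htm hne; omega
        · exact i3 s' hs' t htm hne

lemma pvOcc_bounds (f : List Int → List Int) (rows : List (List Int)) (c x : Int)
    (h : x ∈ pvOcc f rows c) : 0 ≤ x ∧ x < (rows.length : Int) := by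
  obtain ⟨k, hk, rfl, _⟩ := (pvOcc_mem f rows c x).mp h
  constructor
  · exact Int.natCast_nonneg k
  · exact_mod_cast hk

lemma pvGroups_char (rows : List (List Int)) :
    ∀ (cs : List Int),
    (∀ c ∈ cs, ∃ k : Nat, k < rows.length ∧ c ∈ (rows.getD k []).take 2) →
    ∀ init : Int, init ≤ (rows.length : Int) →
    (cs.foldl (fun best c => pvScan (rows.length : Int)
        (PySem.List.pyGetD (pvOcc (fun r => r) rows c) 0 0)
        (pvOcc (fun r => r) rows c)
        (pvOcc (fun r => r.take 2) rows c) best) init) ≤ init ∧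
    ((cs.foldl (fun best c => pvScan (rows.length : Int)
        (PySem.List.pyGetD (pvOcc (fun r => r) rows c) 0 0)
        (pvOcc (fun r => r) rows c)
        (pvOcc (fun r => r.take 2) rows c) best) init) = init ∨
      pvCand rows (cs.foldl (fun best c => pvScan (rows.length : Int)
        (PySem.List.pyGetD (pvOcc (fun r => r) rows c) 0 0)
        (pvOcc (fun r => r) rows c)
        (pvOcc (fun r => r.take 2) rows c) best) init)) ∧
    (∀ c ∈ cs, ∀ s ∈ pvOcc (fun r => r.take 2) rows c, ∀ t ∈ pvOcc (fun r => r) rows c,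
      t ≠ s → (cs.foldl (fun best c => pvScan (rows.length : Int)
        (PySem.List.pyGetD (pvOcc (fun r => r) rows c) 0 0)
        (pvOcc (fun r => r) rows c)
        (pvOcc (fun r => r.take 2) rows c) best) init) ≤ (t - s) % (rows.length : Int)) := by
  intro cs
  induction cs with
  | nil => intro _ init _; simp
  | cons c cs ih =>
    intro hcs init hinit
    -- facts about this color group
    have hTs := pvOcc_sorted (fun r => r) rows c
    have hTb : ∀ t ∈ pvOcc (fun r => r) rows c, 0 ≤ t ∧ t < (rows.length : Int) :=
      fun t ht => pvOcc_bounds _ rows c t ht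
    have hST : ∀ s ∈ pvOcc (fun r => r.take 2) rows c, s ∈ pvOcc (fun r => r) rows c := by
      intro s hs
      obtain ⟨k, hk, rfl, hc⟩ := (pvOcc_mem _ rows c s).mp hs
      exact (pvOcc_mem _ rows c _).mpr ⟨k, hk, rfl, List.take_subset 2 _ hc⟩
    obtain ⟨k0, hk0, hck0⟩ := hcs c List.mem_cons_self
    have hs0 : ((k0 : Int)) ∈ pvOcc (fun r => r.take 2) rows c :=
      (pvOcc_mem _ rows c _).mpr ⟨k0, hk0, rfl, hck0⟩
    have hTne : pvOcc (fun r => r) rows c ≠ [] := by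
      intro h
      have := hST _ hs0
      rw [h] at this
      simp at this
    have hT0 : (pvOcc (fun r => r) rows c).head? =
        some (PySem.List.pyGetD (pvOcc (fun r => r) rows c) 0 0) := by
      cases hTeq : pvOcc (fun r => r) rows c with
      | nil => exact absurd hTeq hTne
      | cons a T' => rw [PySem.List.pyGetD_zero_cons, List.head?_cons]
    have hfilter : (pvOcc (fun r => r) rows c).filter (fun t => decide ((-1 : Int) < t))
        = pvOcc (fun r => r) rows c := by
      rw [List.filter_eq_self]
      intro a ha
      have := (hTb a ha).1
      simp
      omega
    obtain ⟨s1, s2, s3⟩ := pvScan_char (rows.length : Int)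
      (PySem.List.pyGetD (pvOcc (fun r => r) rows c) 0 0)
      (pvOcc (fun r => r) rows c) hTs hTb hT0
      (pvOcc (fun r => r.take 2) rows c) (-1) init
      (pvOcc_sorted (fun r => r.take 2) rows c)
      (fun s hs => ⟨hST s hs, by have := pvOcc_bounds _ rows c s hs; omega,
        (pvOcc_bounds _ rows c s hs).1, (pvOcc_bounds _ rows c s hs).2⟩) hinit
    rw [hfilter] at s1 s2 s3
    -- candidate conversion for this group
    have hconv : ∀ s ∈ pvOcc (fun r => r.take 2) rows c, ∀ t ∈ pvOcc (fun r => r) rows c,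
        t ≠ s → pvCand rows ((t - s) % (rows.length : Int)) := by
      intro s hs t ht hne
      obtain ⟨ks, hks, rfl, hcs'⟩ := (pvOcc_mem _ rows c s).mp hs
      obtain ⟨kt, hkt, rfl, hct⟩ := (pvOcc_mem _ rows c t).mp ht
      exact ⟨ks, kt, hks, hkt, fun e => hne (by exact_mod_cast e.symm), ⟨c, hcs', hct⟩, rfl⟩
    simp only [List.foldl_cons]
    obtain ⟨i1, i2, i3⟩ := ih (fun c' hc' => hcs c' (List.mem_cons_of_mem _ hc'))
      (pvScan (rows.length : Int)
        (PySem.List.pyGetD (pvOcc (fun r => r) rows c) 0 0)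
        (pvOcc (fun r => r) rows c)
        (pvOcc (fun r => r.take 2) rows c) init) (by omega)
    refine ⟨by omega, ?_, ?_⟩
    · rcases i2 with h | h
      · rw [h]
        rcases s2 with h' | ⟨s, hs, t, ht, hne, heq⟩
        · exact Or.inl h'
        · exact Or.inr (heq ▸ hconv s hs t ht hne)
      · exact Or.inr h
    · intro c' hc' s hs t ht hne
      rcases List.mem_cons.mp hc' with rfl | hc''
      · have := s3 s hs t ht hne
        omega
      · exact i3 c' hc'' s hs t ht hne

lemma pvB_char (rows : List (List Int)) :
    find_min_spacing_alt rows ≤ (rows.length : Int) ∧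
    (find_min_spacing_alt rows = (rows.length : Int) ∨ pvCand rows (find_min_spacing_alt rows)) ∧
    (∀ j, pvCand rows j → find_min_spacing_alt rows ≤ j) := by
  have hslice' : ∀ r : List Int, PySem.List.slice r none (some 2) = r.take 2 := by
    intro r
    have := PySem.List.slice_to (xs := r) (b := (2 : Int)) (by norm_num)
    simpa using this
  have hdef : find_min_spacing_alt rows =
      (PySem.Set.ofList ((pvPairs (fun r => r.take 2) rows).map (fun p => p.1))).foldl
        (fun best c => pvScan (rows.length : Int)
          (PySem.List.pyGetD (pvOcc (fun r => r) rows c) 0 0)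
          (pvOcc (fun r => r) rows c)
          (pvOcc (fun r => r.take 2) rows c) best) (rows.length : Int) := by
    simp only [find_min_spacing_alt, PySem.List.len_eq, hslice']
    rw [PySem.Dict.items_eq_map_keys _ (pvBuild_keys_nodup (fun r => r.take 2) rows) ([] : List Int)]
    rw [pvBuild_keys (fun r => r.take 2) rows]
    rw [List.foldl_map]
    apply PySem.List.foldl_congr_mem
    intro acc x _
    rw [pvBuild_getD (fun r => r) rows x, pvBuild_getD (fun r => r.take 2) rows x]
  have hcs : ∀ c ∈ PySem.Set.ofList ((pvPairs (fun r : List Int => r.take 2) rows).map (fun p => p.1)),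
      ∃ k : Nat, k < rows.length ∧ c ∈ (rows.getD k []).take 2 := by
    intro c hc
    rw [PySem.Set.mem_ofList] at hc
    obtain ⟨q, hq, rfl⟩ := List.mem_map.mp hc
    obtain ⟨k, hk, _, h1⟩ := (pvPairs_mem _ rows q).mp hq
    exact ⟨k, hk, h1⟩
  obtain ⟨g1, g2, g3⟩ := pvGroups_char rows
    (PySem.Set.ofList ((pvPairs (fun r : List Int => r.take 2) rows).map (fun p => p.1)))
    hcs (rows.length : Int) (le_refl _)
  rw [hdef]
  refine ⟨g1, g2, ?_⟩
  intro j hj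
  obtain ⟨s, t, hs, ht, hne, ⟨c, hc1, hc2⟩, hjeq⟩ := hj
  have hcmem : c ∈ PySem.Set.ofList ((pvPairs (fun r : List Int => r.take 2) rows).map (fun p => p.1)) := by
    rw [PySem.Set.mem_ofList]
    exact List.mem_map.mpr ⟨(c, (s : Int)), (pvPairs_mem _ rows _).mpr ⟨s, hs, rfl, hc1⟩, rfl⟩
  have hsm : ((s : Int)) ∈ pvOcc (fun r => r.take 2) rows c :=
    (pvOcc_mem _ rows c _).mpr ⟨s, hs, rfl, hc1⟩
  have htm : ((t : Int)) ∈ pvOcc (fun r => r) rows c :=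
    (pvOcc_mem _ rows c _).mpr ⟨t, ht, rfl, hc2⟩
  have hne' : ((t : Int)) ≠ (s : Int) := fun e => hne (by exact_mod_cast e.symm)
  have := g3 c hcmem (s : Int) hsm (t : Int) htm hne'
  rw [hjeq]
  exact this

-- ===== VERDICT (by name: the statement is the Claim_ definition above) =====
theorem find_min_spacing_spec : Claim_equal_find_min_spacing := by
  intro rows _hDom hPre
  unfold Spec_find_min_spacing
  obtain ⟨hA1, hA2, hA3⟩ := pvA_char rows hPre
  obtain ⟨hB1, hB2, hB3⟩ := pvB_char rows
  have h1 : find_min_spacing rows ≤ find_min_spacing_alt rows := by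
    rcases hB2 with h | h
    · omega
    · exact hA3 _ h
  have h2 : find_min_spacing_alt rows ≤ find_min_spacing rows := by
    rcases hA2 with h | h
    · omega
    · exact hB3 _ h
  omega
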